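-- pv_equiv track=rewrite | github.com/dougscohen/cs-sprint-challenge-hash-tables | hashtables/ex4/ex4.py | has_negatives
-- ===== SOURCE A (Python) =====
-- def has_negatives(a):
--     """
--     YOUR CODE HERE
--     """
--     # sort the array from largest to smallest
--     a.sort(reverse=True)
--
--     # empty dictionary where key = positive number, and value = negative number
--     dictionary = {}
--
--     # loop through array
--     for item in a:
--         # if item is positive, add it as a key in the dictionary
--         if item > 0:
--             dictionary[item] = None
--
--         # if item is negative, see if its positive counterpart is already in
--         #. dictionary
--         if item < 0:
--             if abs(item) in dictionary:
--
--                 # if it is, add it as the value for its positive key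
--                 dictionary[abs(item)] = item
--
--     # list that will contain positive numbers that have a negative counterpart
--     result = []
--
--     # loop through the dictionart
--     for key, value in dictionary.items():
--
--         # if value is not None, it means that key:value pair contains a
--         #. positive number and its negative counterpart
--         if value != None:
--
--             # append the key (positive number)
--             result.append(key)
--
--     # results are in descending order, so lets sort it (preference)
--     result.sort()
--
--     return result
-- ===== SOURCE B (Python) =====
-- def has_negatives(a):
--     # same observable side effect as the original: the argument ends sorted descending
--     a.sort(reverse=True)
--     # split into ascending positives and ascending absolute values of negatives,
--     # then intersect the two sorted lists with a classic two-pointer merge (dedup on the fly)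
--     pos = sorted(x for x in a if x > 0)
--     neg = sorted(-x for x in a if x < 0)
--     res = []
--     i = j = 0
--     while i < len(pos) and j < len(neg):
--         if pos[i] < neg[j]:
--             i += 1
--         elif neg[j] < pos[i]:
--             j += 1
--         else:
--             if not res or res[-1] != pos[i]:
--                 res.append(pos[i])
--             i += 1
--             j += 1
--     return res
-- ===== Notes on version B (the rewrite author's own statement) =====
-- stated objective: alternative
-- what changed: Replaces A's None-marker dictionary (hash) passes by a sorted two-pointer merge: split the array into ascending positives and ascending negated negatives, then intersect the two sorted lists with two indices, deduplicating against the last emitted element; no dictionary or set is used.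
import Mathlib
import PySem

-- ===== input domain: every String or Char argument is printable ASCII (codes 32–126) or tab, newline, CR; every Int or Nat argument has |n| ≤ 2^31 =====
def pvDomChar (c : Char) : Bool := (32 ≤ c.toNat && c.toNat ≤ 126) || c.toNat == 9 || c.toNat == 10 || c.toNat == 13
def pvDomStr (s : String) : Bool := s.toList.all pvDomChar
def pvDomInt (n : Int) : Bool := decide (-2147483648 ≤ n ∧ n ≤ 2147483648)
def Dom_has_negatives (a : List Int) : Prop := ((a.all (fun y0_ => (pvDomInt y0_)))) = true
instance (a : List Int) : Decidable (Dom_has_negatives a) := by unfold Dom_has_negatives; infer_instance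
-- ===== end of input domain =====

-- B replaces A's None-marker dictionary passes by a sorted two-pointer merge intersection of the
-- positives and the negated negatives (objective: alternative algorithm, no hash table). A sorts its
-- argument in place; B performs the same mutation in Python; the theorems are about the return value.


-- ===== PORT A =====
-- body of A's first loop: two successive ifs on the sign of item
def aStep (d : PySem.Dict Int (Option Int)) (item : Int) : PySem.Dict Int (Option Int) :=
  let d1 := if item > 0 then d.insert item none else d
  if item < 0 then
    (if d1.contains |item| then d1.insert |item| (some item) else d1)
  else d1

def has_negatives (a : List Int) : List Int :=
  let s := PySem.List.sorted a (fun x => x) true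
  let d := s.foldl aStep (PySem.Dict.empty : PySem.Dict Int (Option Int))
  let result := d.items.foldl (fun r kv => if kv.2 ≠ none then r ++ [kv.1] else r) []
  PySem.List.sorted result (fun x => x) false

-- ===== PORT B =====
-- Source B's while loop: two pointers into the sorted lists pos / neg, res grows at the end,
-- dedup by comparing with res[-1] (getLast?)
def bLoop : List Int → List Int → List Int → List Int
  | res, p::ps, n::ns =>
    if p < n then bLoop res ps (n::ns)
    else if n < p then bLoop res (p::ps) ns
    else bLoop (if res.getLast? ≠ some p then res ++ [p] else res) ps ns
  | res, _, _ => res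
termination_by _res pos neg => pos.length + neg.length
decreasing_by all_goals (simp; try omega)

def has_negatives_alt (a : List Int) : List Int :=
  let s := PySem.List.sorted a (fun x => x) true
  let pos := PySem.List.sorted (s.filter (fun x => decide (x > 0))) (fun x => x) false
  let neg := PySem.List.sorted ((s.filter (fun x => decide (x < 0))).map (fun x => -x)) (fun x => x) false
  bLoop [] pos neg

-- ===== PRECONDITION & SPEC =====
def Spec_has_negatives (a : List Int) (out : List Int) : Prop := out = has_negatives_alt a
instance (a : List Int) (out : List Int) : Decidable (Spec_has_negatives a out) := by unfold Spec_has_negatives; infer_instance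

-- ===== CLAIM (what is proved, stated in full; the proofs are below) =====
def Claim_equal_has_negatives : Prop := ∀ (a : List Int), Dom_has_negatives a → Spec_has_negatives a (has_negatives a)

-- ===== LEMMAS AND PROOFS =====

-- ---- A side: the dictionary after processing prefix p (descending context) is characterised by get?
theorem aStep_inv (l p : List Int) (d : PySem.Dict Int (Option Int))
    (hord : ∀ x ∈ p, ∀ y ∈ l, y ≤ x)
    (hsrt : l.Pairwise (fun x y => y ≤ x))
    (hd : ∀ k : Int, d.get? k =
      if k ∈ p ∧ 0 < k then some (if -k ∈ p then some (-k) else none) else none) :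
    ∀ k : Int, (l.foldl aStep d).get? k =
      if k ∈ p ++ l ∧ 0 < k then some (if -k ∈ p ++ l then some (-k) else none) else none := by
  induction l generalizing p d with
  | nil => simpa using hd
  | cons i l' ih =>
    have hi_le : ∀ x ∈ p, i ≤ x := fun x hx => hord x hx i (by simp)
    have hl'_le_i : ∀ y ∈ l', y ≤ i := fun y hy => (List.pairwise_cons.mp hsrt).1 y hy
    have hord' : ∀ x ∈ p ++ [i], ∀ y ∈ l', y ≤ x := by
      intro x hx y hy
      rcases List.mem_append.mp hx with hx | hx
      · exact hord x hx y (by simp [hy])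
      · simp at hx; subst hx; exact hl'_le_i y hy
    have hsrt' := (List.pairwise_cons.mp hsrt).2
    have hd' : ∀ k : Int, (aStep d i).get? k =
        if k ∈ p ++ [i] ∧ 0 < k then some (if -k ∈ p ++ [i] then some (-k) else none) else none := by
      intro k
      unfold aStep
      rcases lt_trichotomy i 0 with hi | hi | hi
      · -- i < 0
        have hpos : ¬ i > 0 := by omega
        have habs : |i| = -i := abs_of_neg hi
        simp only [hpos, if_false, hi, if_true, habs]
        have hcont : d.contains (-i) = decide ((-i : Int) ∈ p) := by
          rw [PySem.Dict.contains_eq_isSome_get?, hd (-i)]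
          by_cases h : (-i : Int) ∈ p
          · simp [h]
            omega
          · simp [h]
        by_cases hmem : (-i : Int) ∈ p
        · simp only [hcont, hmem, decide_true, if_true]
          rw [PySem.Dict.get?_insert]
          by_cases hk : k = -i
          · subst hk
            have : (0:Int) < -i := by omega
            simp [hmem, hi]
          · rw [if_neg hk, hd k]
            by_cases hkp : k ∈ p ∧ 0 < k
            · have hki : k ≠ i := by omega
              have hnk : -k ≠ i := fun h => hk (by omega)
              simp [hkp.1, hkp.2, hki, hnk]
            · have : ¬ (k ∈ p ++ [i] ∧ 0 < k) := by
                intro ⟨h1, h2⟩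
                rcases List.mem_append.mp h1 with h1 | h1
                · exact hkp ⟨h1, h2⟩
                · simp at h1; omega
              simp only [hkp, if_false, this, if_false]
        · simp only [hcont, hmem, decide_false, Bool.false_eq_true, if_false]
          rw [hd k]
          by_cases hkp : k ∈ p ∧ 0 < k
          · have hki : k ≠ i := by omega
            have hnk : -k ≠ i := by
              intro h
              exact hmem (by rw [show (-i : Int) = k by omega]; exact hkp.1)
            simp [hkp.1, hkp.2, hki, hnk]
          · have : ¬ (k ∈ p ++ [i] ∧ 0 < k) := by
              intro ⟨h1, h2⟩
              rcases List.mem_append.mp h1 with h1 | h1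
              · exact hkp ⟨h1, h2⟩
              · simp at h1; omega
            simp only [hkp, if_false, this, if_false]
      · -- i = 0
        subst hi
        simp only [lt_irrefl, if_false]
        rw [hd k]
        by_cases hkp : k ∈ p ∧ 0 < k
        · have : -k ≠ (0:Int) := by omega
          simp [hkp.1, hkp.2, this]
        · have : ¬ (k ∈ p ++ [(0:Int)] ∧ 0 < k) := by
            intro ⟨h1, h2⟩
            rcases List.mem_append.mp h1 with h1 | h1
            · exact hkp ⟨h1, h2⟩
            · simp at h1; omega
          simp only [hkp, if_false, this, if_false]
      · -- i > 0
        have hneg : ¬ i < 0 := by omega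
        simp only [hi, if_true, hneg, if_false]
        rw [PySem.Dict.get?_insert]
        by_cases hk : k = i
        · subst hk
          have hnk : -k ∉ p := fun h => by have := hi_le _ h; omega
          have hnki : -k ≠ k := by omega
          simp [hi, hnk, hnki]
        · rw [if_neg hk, hd k]
          by_cases hkp : k ∈ p ∧ 0 < k
          · have hnk : -k ≠ i := by omega
            simp [hkp.1, hkp.2, hnk]
          · have : ¬ (k ∈ p ++ [i] ∧ 0 < k) := by
              intro ⟨h1, h2⟩
              rcases List.mem_append.mp h1 with h1 | h1
              · exact hkp ⟨h1, h2⟩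
              · simp at h1; exact hk h1
            simp only [hkp, if_false, this, if_false]
    have hmain := ih (p ++ [i]) (aStep d i) hord' hsrt' hd'
    intro k
    simpa only [List.foldl_cons, List.append_assoc, List.singleton_append] using hmain k

theorem aStep_nodup (l : List Int) (d : PySem.Dict Int (Option Int)) (h : d.keys.Nodup) :
    (l.foldl aStep d).keys.Nodup := by
  induction l generalizing d with
  | nil => simpa using h
  | cons i l' ih =>
    apply ih
    simp only [aStep]
    split_ifs <;> first
      | exact PySem.Dict.nodup_keys_insert _ _ _ (PySem.Dict.nodup_keys_insert _ _ _ h)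
      | exact PySem.Dict.nodup_keys_insert _ _ _ h
      | exact h

-- A's result-collection loop, as filter + map (generalised accumulator)
theorem collect_eq (l : List (Int × Option Int)) (acc : List Int) :
    l.foldl (fun r kv => if kv.2 ≠ none then r ++ [kv.1] else r) acc
      = acc ++ (l.filter (fun kv => decide (kv.2 ≠ none))).map Prod.fst := by
  induction l generalizing acc with
  | nil => simp
  | cons kv t ih =>
    simp only [List.foldl_cons, List.filter_cons, ih]
    by_cases h : kv.2 = none
    · simp [h]
    · simp [h]

-- A's value, characterised: the ascending sort of the distinct positives with a negative counterpart
theorem a_char (s : List Int) (hsrt : s.Pairwise (fun x y => y ≤ x)) :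
    PySem.List.sorted
        ((s.foldl aStep (PySem.Dict.empty : PySem.Dict Int (Option Int))).items.foldl
          (fun r kv => if kv.2 ≠ none then r ++ [kv.1] else r) []) (fun x => x) false
      = PySem.List.sorted
          (List.filter (fun x => decide (0 < x) && (PySem.Set.ofList s).contains (-x))
            (PySem.Set.ofList s)) (fun x => x) false := by
  have hnd : (s.foldl aStep (PySem.Dict.empty : PySem.Dict Int (Option Int))).keys.Nodup :=
    aStep_nodup s _ (by simp [PySem.Dict.keys_empty])
  have hget : ∀ k : Int, (s.foldl aStep (PySem.Dict.empty : PySem.Dict Int (Option Int))).get? k =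
      if k ∈ s ∧ 0 < k then some (if -k ∈ s then some (-k) else none) else none := by
    have h0 := aStep_inv s [] PySem.Dict.empty (by simp) hsrt (by simp [PySem.Dict.get?_empty])
    simpa using h0
  set d := s.foldl aStep (PySem.Dict.empty : PySem.Dict Int (Option Int)) with hdd
  rw [collect_eq d.items []]
  apply PySem.List.sorted_eq_sorted_of_perm _ _ _ (fun x y h => h)
  apply (List.perm_ext_iff_of_nodup ?_ ?_).mpr
  · intro k
    constructor
    · intro hk
      simp only [List.mem_map, List.mem_filter, List.nil_append] at hk
      obtain ⟨⟨k', v⟩, ⟨hmem, hv⟩, hfst⟩ := hk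
      simp at hfst hv
      rw [← hfst]
      have hg := PySem.Dict.get?_of_mem_items _ hmem hnd
      rw [hget k'] at hg
      by_cases hc : k' ∈ s ∧ 0 < k'
      · rw [if_pos hc] at hg
        by_cases hmk : -k' ∈ s
        · simp only [List.mem_filter, PySem.Set.mem_ofList, Bool.and_eq_true, decide_eq_true_eq]
          refine ⟨hc.1, hc.2, ?_⟩
          rw [PySem.Set.contains_iff, PySem.Set.mem_ofList]; exact hmk
        · rw [if_neg hmk] at hg
          simp at hg
          exact absurd hg.symm hv
      · rw [if_neg hc] at hg; exact absurd hg (by simp)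
    · intro hk
      simp only [List.mem_filter, PySem.Set.mem_ofList, Bool.and_eq_true, decide_eq_true_eq,
        PySem.Set.contains_iff] at hk
      obtain ⟨hks, hkpos, hmks⟩ := hk
      have hg : d.get? k = some (some (-k)) := by
        rw [hget k, if_pos ⟨hks, hkpos⟩, if_pos hmks]
      have hmem : (k, some (-k)) ∈ d.items := PySem.Dict.mem_items_of_get?_eq_some _ hg
      simp only [List.mem_map, List.mem_filter, List.nil_append]
      exact ⟨(k, some (-k)), ⟨hmem, by simp⟩, rfl⟩
  · simp only [List.nil_append]
    exact List.Nodup.sublist (List.Sublist.map Prod.fst (List.filter_sublist)) hnd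
  · exact List.Nodup.filter _ (PySem.Set.nodup_ofList s)

-- ---- B side: two-pointer merge correctness
-- an element of a strictly increasing list is at most its last element
theorem pairwise_lt_le_getLast (l : List Int) (x y : Int)
    (hp : l.Pairwise (· < ·)) (hx : x ∈ l) (hl : l.getLast? = some y) : x ≤ y := by
  induction l with
  | nil => simp at hx
  | cons a t ih =>
    cases t with
    | nil =>
      simp at hx hl; omega
    | cons b t' =>
      rw [List.getLast?_cons_cons] at hl
      rcases List.mem_cons.mp hx with hx | hx
      · subst hx
        have hy : y ∈ b :: t' := List.mem_of_getLast? hl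
        have := (List.pairwise_cons.mp hp).1 y hy
        omega
      · exact ih (List.pairwise_cons.mp hp).2 hx hl

theorem bLoop_spec_fuel : ∀ (m : Nat) (pos neg res : List Int),
    pos.length + neg.length ≤ m →
    pos.Pairwise (· ≤ ·) → neg.Pairwise (· ≤ ·) → res.Pairwise (· < ·) →
    (∀ r ∈ res, ∀ x ∈ pos, r ≤ x) → (∀ r ∈ res, ∀ x ∈ neg, r ≤ x) →
    (bLoop res pos neg).Pairwise (· < ·) ∧
    (∀ k, k ∈ bLoop res pos neg ↔ k ∈ res ∨ (k ∈ pos ∧ k ∈ neg)) := by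
  intro m
  induction m with
  | zero =>
    intro pos neg res hm hpos hneg hres hrp hrn
    cases pos with
    | nil => refine ⟨by simpa [bLoop] using hres, fun k => by simp [bLoop]⟩
    | cons p ps =>
      cases neg with
      | nil => refine ⟨by simpa [bLoop] using hres, fun k => by simp [bLoop]⟩
      | cons n ns => simp at hm
  | succ m ihm =>
    intro pos neg res hm hpos hneg hres hrp hrn
    cases pos with
    | nil => refine ⟨by simpa [bLoop] using hres, fun k => by simp [bLoop]⟩
    | cons p ps =>
      cases neg with
      | nil => refine ⟨by simpa [bLoop] using hres, fun k => by simp [bLoop]⟩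
      | cons n ns =>
        have hps := (List.pairwise_cons.mp hpos).2
        have hp_le : ∀ x ∈ ps, p ≤ x := (List.pairwise_cons.mp hpos).1
        have hns := (List.pairwise_cons.mp hneg).2
        have hn_le : ∀ x ∈ ns, n ≤ x := (List.pairwise_cons.mp hneg).1
        simp only [List.length_cons] at hm
        by_cases h1 : p < n
        · -- drop p: p is smaller than every element of n::ns
          have hstep : bLoop res (p::ps) (n::ns) = bLoop res ps (n::ns) := by
            rw [bLoop]; simp [h1]
          have ih := ihm ps (n::ns) res (by simp; omega) hps hneg hres
            (fun r hr x hx => hrp r hr x (List.mem_cons_of_mem _ hx)) hrn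
          rw [hstep]
          refine ⟨ih.1, fun k => ?_⟩
          rw [(ih.2 k)]
          constructor
          · rintro (h | ⟨h2, h3⟩)
            · exact Or.inl h
            · exact Or.inr ⟨List.mem_cons_of_mem _ h2, h3⟩
          · rintro (h | ⟨h2, h3⟩)
            · exact Or.inl h
            · rcases List.mem_cons.mp h2 with rfl | h2
              · -- k = p but k ∈ n::ns: impossible since p < n ≤ everything there
                exfalso
                rcases List.mem_cons.mp h3 with rfl | h3
                · omega
                · have := hn_le _ h3; omega
              · exact Or.inr ⟨h2, h3⟩
        · by_cases h2 : n < p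
          · -- drop n
            have hstep : bLoop res (p::ps) (n::ns) = bLoop res (p::ps) ns := by
              rw [bLoop]; simp [h1, h2]
            have ih := ihm (p::ps) ns res (by simp; omega) hpos hns hres hrp
              (fun r hr x hx => hrn r hr x (List.mem_cons_of_mem _ hx))
            rw [hstep]
            refine ⟨ih.1, fun k => ?_⟩
            rw [(ih.2 k)]
            constructor
            · rintro (h | ⟨h3, h4⟩)
              · exact Or.inl h
              · exact Or.inr ⟨h3, List.mem_cons_of_mem _ h4⟩
            · rintro (h | ⟨h3, h4⟩)
              · exact Or.inl h
              · rcases List.mem_cons.mp h4 with rfl | h4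
                · exfalso
                  rcases List.mem_cons.mp h3 with rfl | h3
                  · omega
                  · have := hp_le _ h3; omega
                · exact Or.inr ⟨h3, h4⟩
          · -- p = n: emit (unless it is already the last element of res)
            have heq : n = p := by omega
            subst heq
            -- the shared value is now named n
            set res' := if res.getLast? ≠ some n then res ++ [n] else res with hres'
            have hstep : bLoop res (n::ps) (n::ns) = bLoop res' ps ns := by
              rw [bLoop]; simp [hres']
            have hmem_res' : ∀ k, k ∈ res' ↔ k ∈ res ∨ k = n := by
              intro k
              by_cases hl : res.getLast? = some n
              · have hpin : n ∈ res := List.mem_of_getLast? hl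
                simp only [hres', hl, ne_eq, not_true_eq_false, if_false]
                constructor
                · exact Or.inl
                · rintro (h | rfl)
                  · exact h
                  · exact hpin
              · simp [hres', hl, List.mem_append]
            have hres'_pw : res'.Pairwise (· < ·) := by
              by_cases hl : res.getLast? = some n
              · simpa [hres', hl] using hres
              · simp only [hres', hl, ne_eq, not_false_iff, if_true]
                rw [List.pairwise_append]
                refine ⟨hres, by simp, ?_⟩
                intro r hr x hx
                simp at hx
                have hle : r ≤ n := hrp r hr n (by simp)
                have hne : r ≠ n := by
                  -- r = n ∈ res would force getLast? = some n, contradicting hl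
                  intro hrn2
                  cases hlast : res.getLast? with
                  | none => simp [List.getLast?_eq_none_iff] at hlast; simp [hlast] at hr
                  | some y =>
                    have h3 := pairwise_lt_le_getLast res r y hres hr hlast
                    have hy : y ∈ res := List.mem_of_getLast? hlast
                    have h4 : y ≤ n := hrp y hy n (by simp)
                    exact hl (by rw [hlast]; congr 1; omega)
                omega
            have hrp' : ∀ r ∈ res', ∀ x ∈ ps, r ≤ x := by
              intro r hr x hx
              rcases (hmem_res' r).mp hr with hr | rfl
              · exact hrp r hr x (List.mem_cons_of_mem _ hx)
              · exact hp_le x hx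
            have hrn' : ∀ r ∈ res', ∀ x ∈ ns, r ≤ x := by
              intro r hr x hx
              rcases (hmem_res' r).mp hr with hr | rfl
              · exact hrn r hr x (List.mem_cons_of_mem _ hx)
              · exact hn_le x hx
            have ih := ihm ps ns res' (by omega) hps hns hres'_pw hrp' hrn'
            rw [hstep]
            refine ⟨ih.1, fun k => ?_⟩
            rw [(ih.2 k), hmem_res' k]
            constructor
            · rintro ((h | rfl) | ⟨h3, h4⟩)
              · exact Or.inl h
              · exact Or.inr ⟨by simp, by simp⟩
              · exact Or.inr ⟨List.mem_cons_of_mem _ h3, List.mem_cons_of_mem _ h4⟩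
            · rintro (h | ⟨h3, h4⟩)
              · exact Or.inl (Or.inl h)
              · rcases List.mem_cons.mp h3 with rfl | h3
                · exact Or.inl (Or.inr rfl)
                · rcases List.mem_cons.mp h4 with rfl | h4
                  · exact Or.inl (Or.inr rfl)
                  · exact Or.inr ⟨h3, h4⟩

theorem bLoop_spec (pos neg res : List Int)
    (hpos : pos.Pairwise (· ≤ ·)) (hneg : neg.Pairwise (· ≤ ·)) (hres : res.Pairwise (· < ·))
    (hrp : ∀ r ∈ res, ∀ x ∈ pos, r ≤ x) (hrn : ∀ r ∈ res, ∀ x ∈ neg, r ≤ x) :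
    (bLoop res pos neg).Pairwise (· < ·) ∧
    (∀ k, k ∈ bLoop res pos neg ↔ k ∈ res ∨ (k ∈ pos ∧ k ∈ neg)) :=
  bLoop_spec_fuel (pos.length + neg.length) pos neg res le_rfl hpos hneg hres hrp hrn

-- strictly increasing implies Nodup
theorem nodup_of_pairwise_lt (l : List Int) (h : l.Pairwise (· < ·)) : l.Nodup :=
  h.imp (fun hl => by omega)

theorem has_negatives_eq (a : List Int) : has_negatives a = has_negatives_alt a := by
  simp only [has_negatives, has_negatives_alt]
  set s := PySem.List.sorted a (fun x => x) true with hs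
  have hsrt : s.Pairwise (fun x y => y ≤ x) := PySem.List.sorted_pairwise_rev a (fun x => x)
  rw [a_char s hsrt]
  set pos := PySem.List.sorted (s.filter (fun x => decide (x > 0))) (fun x => x) false with hposd
  set neg := PySem.List.sorted ((s.filter (fun x => decide (x < 0))).map (fun x => -x))
      (fun x => x) false with hnegd
  have hB := bLoop_spec pos neg []
    (PySem.List.sorted_pairwise _ _) (PySem.List.sorted_pairwise _ _)
    (by simp) (by simp) (by simp)
  have hmem_pos : ∀ k : Int, k ∈ pos ↔ k ∈ s ∧ 0 < k := by
    intro k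
    rw [hposd, PySem.List.mem_sorted, List.mem_filter]
    simp
  have hmem_neg : ∀ k : Int, k ∈ neg ↔ -k ∈ s ∧ 0 < k := by
    intro k
    rw [hnegd, PySem.List.mem_sorted]
    simp only [List.mem_map, List.mem_filter, decide_eq_true_eq]
    constructor
    · rintro ⟨x, ⟨hx, hxn⟩, rfl⟩
      constructor
      · simpa using hx
      · omega
    · rintro ⟨hx, hk⟩
      exact ⟨-k, ⟨hx, by omega⟩, by omega⟩
  have hmemB : ∀ k : Int, k ∈ bLoop [] pos neg ↔ k ∈ s ∧ 0 < k ∧ -k ∈ s := by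
    intro k
    rw [hB.2 k]
    simp only [List.not_mem_nil, false_or, hmem_pos, hmem_neg]
    constructor
    · rintro ⟨⟨h1, h2⟩, ⟨h3, _⟩⟩; exact ⟨h1, h2, h3⟩
    · rintro ⟨h1, h2, h3⟩; exact ⟨⟨h1, h2⟩, ⟨h3, h2⟩⟩
  have hmemF : ∀ k : Int,
      k ∈ List.filter (fun x => decide (0 < x) && (PySem.Set.ofList s).contains (-x))
            (PySem.Set.ofList s) ↔ k ∈ s ∧ 0 < k ∧ -k ∈ s := by
    intro k
    simp [List.mem_filter, PySem.Set.mem_ofList]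
  apply PySem.List.sorted_eq_of_perm_of_pairwise_lt
  · apply (List.perm_ext_iff_of_nodup (nodup_of_pairwise_lt _ hB.1)
      (List.Nodup.filter _ (PySem.Set.nodup_ofList s))).mpr
    intro k
    rw [hmemB k, hmemF k]
  · exact hB.1

-- ===== VERDICT (by name: the statement is the Claim_ definition above) =====
theorem has_negatives_spec : Claim_equal_has_negatives := by
  intro a _
  exact has_negatives_eq a
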